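-- pv_equiv track=rewrite | github.com/chainwinit-alt/1957_crawler | 基金會流量分析/GA4流量分析.py | classify_source
-- ===== SOURCE A (Python) =====
-- def classify_source(source_name):
--     s = str(source_name).lower()
--     if 'google' in s: return 'Google搜尋'
--     if any(x in s for x in ['facebook', 'fb', 'm.facebook', 'l.facebook']): return 'Facebook'
--     if 'line' in s: return 'LINE'
--     if 'direct' in s: return '直接流量'
--     if 'instagram' in s or 'ig' in s: return 'Instagram'
--     if 'threads' in s: return 'Threads'
--     return '其他'
-- ===== SOURCE B (Python) =====
-- # Different algorithm: one sweep over string positions collecting the SET of matched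
-- # categories (via startswith at each offset), then a priority pass picks the winner.
-- _KEYWORDS = [
--     ('google', 'Google搜尋'),
--     ('facebook', 'Facebook'), ('fb', 'Facebook'),
--     ('m.facebook', 'Facebook'), ('l.facebook', 'Facebook'),
--     ('line', 'LINE'),
--     ('direct', '直接流量'),
--     ('instagram', 'Instagram'), ('ig', 'Instagram'),
--     ('threads', 'Threads'),
-- ]
-- _PRIORITY = ['Google搜尋', 'Facebook', 'LINE', '直接流量', 'Instagram', 'Threads']
--
-- def classify_source(source_name):
--     s = str(source_name).lower()
--     found = set()
--     for i in range(len(s)):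
--         for kw, cat in _KEYWORDS:
--             if s.startswith(kw, i):
--                 found.add(cat)
--     for cat in _PRIORITY:
--         if cat in found:
--             return cat
--     return '其他'
-- ===== Notes on version B (the rewrite author's own statement) =====
-- stated objective: alternative
-- what changed: Replaced the ordered substring if-chain by a position-sweep matcher: one pass over all string offsets collects the set of categories whose keyword starts there, then a separate priority pass picks the highest-priority matched category.
import Mathlib
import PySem

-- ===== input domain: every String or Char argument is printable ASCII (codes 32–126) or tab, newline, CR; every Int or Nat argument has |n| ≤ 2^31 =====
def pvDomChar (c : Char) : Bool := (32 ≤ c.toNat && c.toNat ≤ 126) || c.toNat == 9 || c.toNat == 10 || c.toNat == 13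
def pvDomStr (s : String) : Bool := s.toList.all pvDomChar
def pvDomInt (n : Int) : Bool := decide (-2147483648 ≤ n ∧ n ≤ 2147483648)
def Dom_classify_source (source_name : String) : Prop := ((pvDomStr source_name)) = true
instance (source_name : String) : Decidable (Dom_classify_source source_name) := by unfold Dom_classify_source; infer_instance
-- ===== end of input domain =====

-- B replaces A's ordered substring if-chain by a position-sweep matcher (collect the set of matched categories, then a priority pass); same behaviour, different algorithm.


-- ===== PORT A =====
def classify_source (source_name : String) : String :=
  let s := PySem.Str.lower source_name
  if PySem.Str.isIn "google" s then "Google搜尋"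
  else if (["facebook", "fb", "m.facebook", "l.facebook"].any (fun x => PySem.Str.isIn x s)) then "Facebook"
  else if PySem.Str.isIn "line" s then "LINE"
  else if PySem.Str.isIn "direct" s then "直接流量"
  else if PySem.Str.isIn "instagram" s || PySem.Str.isIn "ig" s then "Instagram"
  else if PySem.Str.isIn "threads" s then "Threads"
  else "其他"

-- ===== PORT B =====
-- (keyword, category) pairs; keywords kept as List Char since B works positionally on the chars
def bKeywords : List (List Char × String) :=
  [ ("google".toList, "Google搜尋"),
    ("facebook".toList, "Facebook"), ("fb".toList, "Facebook"),
    ("m.facebook".toList, "Facebook"), ("l.facebook".toList, "Facebook"),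
    ("line".toList, "LINE"),
    ("direct".toList, "直接流量"),
    ("instagram".toList, "Instagram"), ("ig".toList, "Instagram"),
    ("threads".toList, "Threads") ]

def bPriority : List String :=
  ["Google搜尋", "Facebook", "LINE", "直接流量", "Instagram", "Threads"]

-- the sweep: for i in range(len(s)): for kw,cat in _KEYWORDS: if s.startswith(kw, i): found.add(cat)
-- (s.startswith(kw, i) with 0 ≤ i < len(s) is exactly startswith of the suffix s[i:] — ported as such)
def bFound (s : List Char) : PySem.Set String :=
  (List.range s.length).foldl
    (fun acc i =>
      bKeywords.foldl
        (fun acc2 kc =>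
          if PySem.Chars.startswith (s.drop i) kc.1 then PySem.Set.add acc2 kc.2 else acc2)
        acc)
    PySem.Set.empty

def bPick (found : PySem.Set String) : List String → String
  | [] => "其他"
  | c :: rest => if PySem.Set.contains found c then c else bPick found rest

def classify_source_alt (source_name : String) : String :=
  let s := (PySem.Str.lower source_name).toList
  bPick (bFound s) bPriority

-- ===== PRECONDITION & SPEC =====
def Spec_classify_source (source_name : String) (out : String) : Prop := out = classify_source_alt source_name
instance (source_name : String) (out : String) : Decidable (Spec_classify_source source_name out) := by unfold Spec_classify_source; infer_instance

-- ===== CLAIM (what is proved, stated in full; the proofs are below) =====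
def Claim_equal_classify_source : Prop := ∀ (source_name : String), Dom_classify_source source_name → Spec_classify_source source_name (classify_source source_name)

-- ===== LEMMAS AND PROOFS =====

-- membership in the inner fold over the keyword table
lemma mem_inner_fold (s : List Char) (i : Nat) (acc : PySem.Set String) (x : String) :
    x ∈ bKeywords.foldl
        (fun acc2 kc =>
          if PySem.Chars.startswith (s.drop i) kc.1 then PySem.Set.add acc2 kc.2 else acc2)
        acc
      ↔ x ∈ acc ∨ ∃ kc ∈ bKeywords, PySem.Chars.startswith (s.drop i) kc.1 = true ∧ kc.2 = x := by
  generalize bKeywords = l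
  induction l generalizing acc with
  | nil => simp
  | cons kc rest ih =>
    simp only [List.foldl_cons, ih, List.mem_cons]
    split_ifs with h
    · simp only [PySem.Set.mem_add]
      constructor
      · rintro ((hx | rfl) | ⟨kc', h1, h2, h3⟩)
        · exact Or.inl hx
        · exact Or.inr ⟨kc, Or.inl rfl, h, rfl⟩
        · exact Or.inr ⟨kc', Or.inr h1, h2, h3⟩
      · rintro (hx | ⟨kc', (rfl | h1), h2, h3⟩)
        · exact Or.inl (Or.inl hx)
        · exact Or.inl (Or.inr h3.symm)
        · exact Or.inr ⟨kc', h1, h2, h3⟩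
    · constructor
      · rintro (hx | ⟨kc', h1, h2, h3⟩)
        · exact Or.inl hx
        · exact Or.inr ⟨kc', Or.inr h1, h2, h3⟩
      · rintro (hx | ⟨kc', (rfl | h1), h2, h3⟩)
        · exact Or.inl hx
        · exact absurd h2 (by simpa using h)
        · exact Or.inr ⟨kc', h1, h2, h3⟩

-- membership in bFound: some offset, some keyword row
lemma mem_bFound (s : List Char) (x : String) :
    x ∈ bFound s ↔
      ∃ kc ∈ bKeywords, kc.2 = x ∧ ∃ i ∈ List.range s.length, PySem.Chars.startswith (s.drop i) kc.1 = true := by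
  unfold bFound
  generalize List.range s.length = l
  have main : ∀ (acc : PySem.Set String),
      x ∈ l.foldl (fun acc i => bKeywords.foldl
        (fun acc2 kc =>
          if PySem.Chars.startswith (s.drop i) kc.1 then PySem.Set.add acc2 kc.2 else acc2) acc) acc
      ↔ x ∈ acc ∨ ∃ kc ∈ bKeywords, kc.2 = x ∧ ∃ i ∈ l, PySem.Chars.startswith (s.drop i) kc.1 = true := by
    induction l with
    | nil => simp
    | cons j rest ih =>
      intro acc
      rw [List.foldl_cons, ih, mem_inner_fold]
      simp only [List.mem_cons]
      constructor
      · rintro ((hx | ⟨kc, hkc, hsw, hx⟩) | ⟨kc, hkc, hx, i, hi, hsw⟩)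
        · exact Or.inl hx
        · exact Or.inr ⟨kc, hkc, hx, j, Or.inl rfl, hsw⟩
        · exact Or.inr ⟨kc, hkc, hx, i, Or.inr hi, hsw⟩
      · rintro (hx | ⟨kc, hkc, hx, i, rfl | hi, hsw⟩)
        · exact Or.inl (Or.inl hx)
        · exact Or.inl (Or.inr ⟨kc, hkc, hsw, hx⟩)
        · exact Or.inr ⟨kc, hkc, hx, i, hi, hsw⟩
  rw [main]
  simp

-- an in-range startswith witness is exactly an infix occurrence, for nonempty keywords
lemma exists_startswith_iff_isIn (s kw : List Char) (hk : kw ≠ []) :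
    (∃ i ∈ List.range s.length, PySem.Chars.startswith (s.drop i) kw = true)
      ↔ PySem.Chars.isIn kw s = true := by
  rw [← PySem.Chars.exists_prefix_drop_iff_isIn]
  constructor
  · rintro ⟨i, _, h⟩
    exact ⟨i, (PySem.Chars.startswith_iff _ _).mp h⟩
  · rintro ⟨j, h⟩
    by_cases hj : j < s.length
    · exact ⟨j, List.mem_range.mpr hj, (PySem.Chars.startswith_iff _ _).mpr h⟩
    · exfalso
      rw [List.drop_eq_nil_of_le (le_of_not_gt hj)] at h
      exact hk (List.prefix_nil.mp h)

-- contains on bFound, rewritten per category into disjunctions of isIn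
lemma contains_bFound (s : List Char) (x : String) :
    PySem.Set.contains (bFound s) x =
      ((decide (x = "Google搜尋") && PySem.Chars.isIn "google".toList s) ||
       (decide (x = "Facebook") && (PySem.Chars.isIn "facebook".toList s || PySem.Chars.isIn "fb".toList s ||
          PySem.Chars.isIn "m.facebook".toList s || PySem.Chars.isIn "l.facebook".toList s)) ||
       (decide (x = "LINE") && PySem.Chars.isIn "line".toList s) ||
       (decide (x = "直接流量") && PySem.Chars.isIn "direct".toList s) ||
       (decide (x = "Instagram") && (PySem.Chars.isIn "instagram".toList s || PySem.Chars.isIn "ig".toList s)) ||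
       (decide (x = "Threads") && PySem.Chars.isIn "threads".toList s)) := by
  cases h : PySem.Set.contains (bFound s) x
  · symm
    rw [Bool.eq_false_iff]
    intro hcon
    have hmem : x ∈ bFound s := by
      rw [mem_bFound]
      simp only [Bool.or_eq_true, Bool.and_eq_true, decide_eq_true_eq] at hcon
      rcases hcon with (((((⟨rfl, hw⟩ | ⟨rfl, hw⟩) | ⟨rfl, hw⟩) | ⟨rfl, hw⟩) | ⟨rfl, hw⟩) | ⟨rfl, hw⟩)
      · exact ⟨("google".toList, _), by simp [bKeywords], rfl,
          (exists_startswith_iff_isIn s _ (by decide)).mpr hw⟩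
      · rcases hw with ((hw | hw) | hw) | hw
        · exact ⟨("facebook".toList, _), by simp [bKeywords], rfl,
            (exists_startswith_iff_isIn s _ (by decide)).mpr hw⟩
        · exact ⟨("fb".toList, _), by simp [bKeywords], rfl,
            (exists_startswith_iff_isIn s _ (by decide)).mpr hw⟩
        · exact ⟨("m.facebook".toList, _), by simp [bKeywords], rfl,
            (exists_startswith_iff_isIn s _ (by decide)).mpr hw⟩
        · exact ⟨("l.facebook".toList, _), by simp [bKeywords], rfl,
            (exists_startswith_iff_isIn s _ (by decide)).mpr hw⟩
      · exact ⟨("line".toList, _), by simp [bKeywords], rfl,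
          (exists_startswith_iff_isIn s _ (by decide)).mpr hw⟩
      · exact ⟨("direct".toList, _), by simp [bKeywords], rfl,
          (exists_startswith_iff_isIn s _ (by decide)).mpr hw⟩
      · rcases hw with hw | hw
        · exact ⟨("instagram".toList, _), by simp [bKeywords], rfl,
            (exists_startswith_iff_isIn s _ (by decide)).mpr hw⟩
        · exact ⟨("ig".toList, _), by simp [bKeywords], rfl,
            (exists_startswith_iff_isIn s _ (by decide)).mpr hw⟩
      · exact ⟨("threads".toList, _), by simp [bKeywords], rfl,
          (exists_startswith_iff_isIn s _ (by decide)).mpr hw⟩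
    exact absurd (List.elem_eq_true_of_mem hmem) (by simpa using h)
  · symm
    have hmem : x ∈ bFound s := List.mem_of_elem_eq_true (by simpa using h)
    rw [mem_bFound] at hmem
    obtain ⟨kc, hkc, hx, hw⟩ := hmem
    subst hx
    simp only [bKeywords, List.mem_cons, List.not_mem_nil, or_false] at hkc
    rcases hkc with rfl | rfl | rfl | rfl | rfl | rfl | rfl | rfl | rfl | rfl <;>
      · obtain ⟨i, hi, hsw⟩ := hw
        have hw' := (exists_startswith_iff_isIn s _ (by decide)).mp ⟨i, hi, hsw⟩
        simp at hw'
        simp [hw']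

-- ===== VERDICT (by name: the statement is the Claim_ definition above) =====
theorem classify_source_spec : Claim_equal_classify_source := by
  intro src _
  unfold Spec_classify_source classify_source classify_source_alt bPriority
  simp only [bPick, contains_bFound, List.any_cons, List.any_nil, Bool.or_false,
    PySem.Str.isIn_eq, PySem.Str.toList_lower]
  split_ifs <;> simp_all
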